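-- pv_equiv track=rewrite | github.com/DMontgomery40/football-tactical-workbench | backend/app/ai_diagnostics.py | _find_anchor_index
-- ===== SOURCE A (Python) =====
-- def _find_anchor_index(lines: list[str], anchor: str) -> int:
--     needle = anchor.strip()
--     for index, line in enumerate(lines):
--         if line.strip().startswith(needle):
--             return index
--     for index, line in enumerate(lines):
--         if needle in line:
--             return index
--     return 0
-- ===== SOURCE B (Python) =====
-- def _find_anchor_index(lines: list[str], anchor: str) -> int:
--     needle = anchor.strip()
--     fallback = None
--     for index, line in enumerate(lines):
--         if line.strip().startswith(needle):
--             return index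
--         if fallback is None and needle in line:
--             fallback = index
--     return fallback if fallback is not None else 0
-- ===== Notes on version B (the rewrite author's own statement) =====
-- stated objective: simpler
-- what changed: Replaced A's two sequential scans with one enumerate pass that returns on the first startswith match and keeps the first contains index as a fallback.
import Mathlib
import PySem

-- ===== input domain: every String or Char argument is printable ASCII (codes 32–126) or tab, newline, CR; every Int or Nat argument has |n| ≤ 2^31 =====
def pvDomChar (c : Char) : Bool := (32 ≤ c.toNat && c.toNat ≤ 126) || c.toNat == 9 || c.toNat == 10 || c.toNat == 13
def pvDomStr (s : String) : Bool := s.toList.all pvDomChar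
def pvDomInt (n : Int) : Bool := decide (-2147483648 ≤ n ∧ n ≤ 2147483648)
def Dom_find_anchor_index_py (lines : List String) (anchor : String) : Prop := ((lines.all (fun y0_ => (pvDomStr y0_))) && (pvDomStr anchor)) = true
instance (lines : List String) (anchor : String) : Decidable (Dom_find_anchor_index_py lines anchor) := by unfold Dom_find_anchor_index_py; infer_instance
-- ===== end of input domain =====

-- B collapses A's two sequential scans into a single enumerate pass with a fallback variable (simpler).

-- ===== PORT A =====
-- first loop: first index whose stripped line startswith needle
def pvScanStart (needle : String) : List String → Int → Option Int
  | [], _ => none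
  | l :: rest, i =>
    if PySem.Str.startswith (PySem.Str.strip l) needle then some i
    else pvScanStart needle rest (i + 1)

-- second loop: first index with needle in line
def pvScanIn (needle : String) : List String → Int → Option Int
  | [], _ => none
  | l :: rest, i =>
    if PySem.Str.isIn needle l then some i
    else pvScanIn needle rest (i + 1)

def find_anchor_index_py (lines : List String) (anchor : String) : Int :=
  let needle := PySem.Str.strip anchor
  match pvScanStart needle lines 0 with
  | some i => i
  | none =>
    match pvScanIn needle lines 0 with
    | some i => i
    | none => 0

-- ===== PORT B =====
-- single pass: return on startswith, remember first 'contains' index as fallback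
def pvOnePass (needle : String) : List String → Int → Option Int → Int
  | [], _, fb => fb.getD 0
  | l :: rest, i, fb =>
    if PySem.Str.startswith (PySem.Str.strip l) needle then i
    else pvOnePass needle rest (i + 1)
      (if fb.isNone && PySem.Str.isIn needle l then some i else fb)

def find_anchor_index_py_alt (lines : List String) (anchor : String) : Int :=
  pvOnePass (PySem.Str.strip anchor) lines 0 none

-- ===== PRECONDITION & SPEC =====
def Spec_find_anchor_index_py (lines : List String) (anchor : String) (out : Int) : Prop := out = find_anchor_index_py_alt lines anchor
instance (lines : List String) (anchor : String) (out : Int) : Decidable (Spec_find_anchor_index_py lines anchor out) := by unfold Spec_find_anchor_index_py; infer_instance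

-- ===== CLAIM (what is proved, stated in full; the proofs are below) =====
def Claim_equal_find_anchor_index_py : Prop := ∀ (lines : List String) (anchor : String), Dom_find_anchor_index_py lines anchor → Spec_find_anchor_index_py lines anchor (find_anchor_index_py lines anchor)

-- ===== LEMMAS AND PROOFS =====
theorem pvOnePass_eq (needle : String) (ls : List String) (i : Int) (fb : Option Int) :
    pvOnePass needle ls i fb =
      match pvScanStart needle ls i with
      | some j => j
      | none =>
        match fb with
        | some f => f
        | none =>
          match pvScanIn needle ls i with
          | some j => j
          | none => 0 := by
  induction ls generalizing i fb with
  | nil => cases fb <;> simp [pvOnePass, pvScanStart, pvScanIn]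
  | cons l rest ih =>
    by_cases hsw : PySem.Chars.startswith (PySem.Chars.strip l.toList) needle.toList = true
    · simp [pvOnePass, pvScanStart, hsw]
    · cases fb with
      | some f => simp [pvOnePass, pvScanStart, hsw, ih]
      | none =>
        by_cases hin : PySem.Chars.isIn needle.toList l.toList = true
        · simp [pvOnePass, pvScanStart, pvScanIn, hsw, hin, ih]
        · simp [pvOnePass, pvScanStart, pvScanIn, hsw, hin, ih]

-- ===== VERDICT (by name: the statement is the Claim_ definition above) =====
theorem find_anchor_index_py_spec : Claim_equal_find_anchor_index_py := by
  intro lines anchor _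
  unfold Spec_find_anchor_index_py find_anchor_index_py find_anchor_index_py_alt
  rw [pvOnePass_eq]
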